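-- pv_equiv track=rewrite | github.com/sowdust/pdfxplr | pdfxplr.py | get_users_sw_from_img_meta
-- ===== SOURCE A (Python) =====
-- def get_users_sw_from_img_meta(metadata):
--
--     users = []
--     sw = []
--     serials = []
--     locations = []
--
--     for m in metadata:
--         if 'ProcessingSoftware' in m.keys():
--             sw.append(m['ProcessingSoftware'])
--         if 'Software' in m.keys():
--             sw.append(m['Software'])
--         if 'CameraOwnerName' in m.keys():
--             users.append(m['CameraOwnerName'])
--         if 'Artist' in m.keys():
--             users.append(m['Artist'])
--         if 'HostComputer' in m.keys():
--             users.append(m['HostComputer'])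
--         if 'Copyright' in m.keys():
--             users.append(m['Copyright'])
--         if 'XPAuthor' in m.keys():
--             users.append(m['XPAuthor'])
--         if 'BodySerialNumber' in m.keys():
--             serials.append(m['BodySerialNumber'])
--         if 'LensSerialNumber' in m.keys():
--             serials.append(m['LensSerialNumber'])
--         if 'CameraSerialNumber' in m.keys():
--             serials.append(m['CameraSerialNumber'])
--         if '_Location' in m.keys():
--             locations.append(m['_Location'])
--
--     return [users,sw,serials,locations]
-- ===== SOURCE B (Python) =====
-- _KEYS = [
--     ['CameraOwnerName', 'Artist', 'HostComputer', 'Copyright', 'XPAuthor'],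
--     ['ProcessingSoftware', 'Software'],
--     ['BodySerialNumber', 'LensSerialNumber', 'CameraSerialNumber'],
--     ['_Location'],
-- ]
--
--
-- def get_users_sw_from_img_meta(metadata):
--     return [[m[k] for m in metadata for k in keys if k in m.keys()]
--             for keys in _KEYS]
-- ===== Notes on version B (the rewrite author's own statement) =====
-- stated objective: simpler
-- what changed: Replaces the single fold carrying four accumulator lists and eleven hard-coded branches with a key table: each output bucket is computed independently as a comprehension over the metadata filtered by its key list.
import Mathlib
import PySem

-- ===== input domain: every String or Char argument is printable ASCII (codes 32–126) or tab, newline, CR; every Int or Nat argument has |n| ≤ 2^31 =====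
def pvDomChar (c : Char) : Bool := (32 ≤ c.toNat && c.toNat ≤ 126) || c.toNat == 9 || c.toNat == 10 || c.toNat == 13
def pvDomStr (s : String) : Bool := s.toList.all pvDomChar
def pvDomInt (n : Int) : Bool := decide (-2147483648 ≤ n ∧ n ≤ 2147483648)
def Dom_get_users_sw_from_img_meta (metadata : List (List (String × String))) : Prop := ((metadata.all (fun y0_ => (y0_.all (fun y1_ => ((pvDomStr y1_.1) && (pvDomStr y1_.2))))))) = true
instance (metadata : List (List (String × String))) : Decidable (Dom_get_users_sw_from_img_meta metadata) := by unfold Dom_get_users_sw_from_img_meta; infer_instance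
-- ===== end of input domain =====

-- B replaces A's single fold over four accumulator lists with eleven hard-coded
-- branches by a key table, computing each output bucket independently (simpler).

-- ===== PORT A =====
-- "if key in m.keys(): lst.append(m[key])" — the statement A repeats eleven times
def pvAppIf (d : PySem.Dict String String) (k : String) (acc : List String) : List String :=
  if d.contains k then acc ++ [d.getD k ""] else acc

def pvStepA (st : List String × List String × List String × List String)
    (m : List (String × String)) :
    List String × List String × List String × List String :=
  let d : PySem.Dict String String := PySem.Dict.mk m
  let users := st.1
  let sw := st.2.1
  let serials := st.2.2.1
  let locations := st.2.2.2
  let sw := pvAppIf d "ProcessingSoftware" sw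
  let sw := pvAppIf d "Software" sw
  let users := pvAppIf d "CameraOwnerName" users
  let users := pvAppIf d "Artist" users
  let users := pvAppIf d "HostComputer" users
  let users := pvAppIf d "Copyright" users
  let users := pvAppIf d "XPAuthor" users
  let serials := pvAppIf d "BodySerialNumber" serials
  let serials := pvAppIf d "LensSerialNumber" serials
  let serials := pvAppIf d "CameraSerialNumber" serials
  let locations := pvAppIf d "_Location" locations
  (users, sw, serials, locations)

def get_users_sw_from_img_meta (metadata : List (List (String × String))) : List (List String) :=
  let r := metadata.foldl pvStepA ([], [], [], [])
  [r.1, r.2.1, r.2.2.1, r.2.2.2]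

-- ===== PORT B =====
def pvKeysTable : List (List String) :=
  [["CameraOwnerName", "Artist", "HostComputer", "Copyright", "XPAuthor"],
   ["ProcessingSoftware", "Software"],
   ["BodySerialNumber", "LensSerialNumber", "CameraSerialNumber"],
   ["_Location"]]

def pvBucket (metadata : List (List (String × String))) (keys : List String) : List String :=
  metadata.flatMap (fun m => keys.filterMap (fun k => (PySem.Dict.mk m).get? k))

def get_users_sw_from_img_meta_alt (metadata : List (List (String × String))) : List (List String) :=
  pvKeysTable.map (pvBucket metadata)

-- ===== PRECONDITION & SPEC =====
def Spec_get_users_sw_from_img_meta (metadata : List (List (String × String))) (out : List (List String)) : Prop := out = get_users_sw_from_img_meta_alt metadata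
instance (metadata : List (List (String × String))) (out : List (List String)) : Decidable (Spec_get_users_sw_from_img_meta metadata out) := by unfold Spec_get_users_sw_from_img_meta; infer_instance

-- ===== CLAIM (what is proved, stated in full; the proofs are below) =====
def Claim_equal_get_users_sw_from_img_meta : Prop := ∀ (metadata : List (List (String × String))), Dom_get_users_sw_from_img_meta metadata → Spec_get_users_sw_from_img_meta metadata (get_users_sw_from_img_meta metadata)

-- ===== LEMMAS AND PROOFS =====
theorem pvAppIf_eq (d : PySem.Dict String String) (k : String) (acc : List String) :
    pvAppIf d k acc = acc ++ (d.get? k).toList := by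
  rw [pvAppIf, PySem.Dict.contains_eq_isSome_get?, PySem.Dict.getD_eq_get?_getD]
  cases d.get? k <;> simp

theorem pvFilterMap_cons {α β : Type} (f : α → Option β) (a : α) (l : List α) :
    List.filterMap f (a :: l) = (f a).toList ++ List.filterMap f l := by
  cases h : f a <;> simp [h]

theorem pvStepA_eq (st : List String × List String × List String × List String)
    (m : List (String × String)) :
    pvStepA st m =
      (st.1 ++ pvBucket [m] ["CameraOwnerName", "Artist", "HostComputer", "Copyright", "XPAuthor"],
       st.2.1 ++ pvBucket [m] ["ProcessingSoftware", "Software"],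
       st.2.2.1 ++ pvBucket [m] ["BodySerialNumber", "LensSerialNumber", "CameraSerialNumber"],
       st.2.2.2 ++ pvBucket [m] ["_Location"]) := by
  simp [pvStepA, pvBucket, pvAppIf_eq, pvFilterMap_cons, List.append_assoc]

theorem pvBucket_cons (m : List (String × String)) (ms : List (List (String × String)))
    (keys : List String) :
    pvBucket (m :: ms) keys = pvBucket [m] keys ++ pvBucket ms keys := by
  simp [pvBucket]

theorem pvFoldl_eq (ms : List (List (String × String)))
    (u s se l : List String) :
    ms.foldl pvStepA (u, s, se, l) =
      (u ++ pvBucket ms ["CameraOwnerName", "Artist", "HostComputer", "Copyright", "XPAuthor"],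
       s ++ pvBucket ms ["ProcessingSoftware", "Software"],
       se ++ pvBucket ms ["BodySerialNumber", "LensSerialNumber", "CameraSerialNumber"],
       l ++ pvBucket ms ["_Location"]) := by
  induction ms generalizing u s se l with
  | nil => simp [pvBucket]
  | cons m ms ih =>
      rw [List.foldl_cons, pvStepA_eq, ih]
      simp [pvBucket_cons m ms, List.append_assoc]

-- ===== VERDICT (by name: the statement is the Claim_ definition above) =====
theorem get_users_sw_from_img_meta_spec : Claim_equal_get_users_sw_from_img_meta := by
  intro metadata _
  show _ = _
  rw [get_users_sw_from_img_meta, get_users_sw_from_img_meta_alt]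
  rw [pvFoldl_eq]
  simp [pvKeysTable]
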